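-- pv_equiv track=rewrite | github.com/jeironpro/coding-bat | coding-bat-python/calentamiento2.py | cadena_fosforo
-- ===== SOURCE A (Python) =====
-- def cadena_fosforo(a, b):
--     contador = 0;
--     longitud = min(len(a), len(b))
--
--     for i in range(longitud):
--         if i < longitud-1:
--             sub = a[i:i+2]
--             if (sub == b[i:i+2]):
--                 contador += 1
--     return contador
-- ===== SOURCE B (Python) =====
-- def cadena_fosforo(a, b):
--     # Run-length decomposition: the counted pairs are exactly the adjacent pairs
--     # inside maximal runs of matching positions; a maximal run of length L
--     # contributes L - 1 pairs.
--     n = min(len(a), len(b))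
--     total = 0
--     i = 0
--     while i < n:
--         if a[i] == b[i]:
--             j = i
--             while j < n and a[j] == b[j]:
--                 j += 1
--             total += j - i - 1
--             i = j
--         else:
--             i += 1
--     return total
-- ===== Notes on version B (the rewrite author's own statement) =====
-- stated objective: faster
-- what changed: Replaces A's per-index length-2 slice comparisons with a run-length decomposition: B scans for maximal runs of positions where the characters match and adds (run length - 1) per run, never building or comparing slices.
import Mathlib
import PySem

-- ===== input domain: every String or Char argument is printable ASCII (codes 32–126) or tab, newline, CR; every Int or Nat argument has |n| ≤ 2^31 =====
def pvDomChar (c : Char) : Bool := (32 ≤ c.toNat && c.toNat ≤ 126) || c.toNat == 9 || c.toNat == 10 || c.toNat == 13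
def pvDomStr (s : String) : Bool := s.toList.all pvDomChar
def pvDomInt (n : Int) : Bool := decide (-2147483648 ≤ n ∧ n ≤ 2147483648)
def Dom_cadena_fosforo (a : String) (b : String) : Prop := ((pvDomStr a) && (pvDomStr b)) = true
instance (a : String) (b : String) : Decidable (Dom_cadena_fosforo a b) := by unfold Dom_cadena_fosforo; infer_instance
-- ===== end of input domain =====

-- B replaces A's per-index length-2 slice comparisons by a run-length decomposition:
-- it finds maximal runs of matching positions and adds (run length - 1) per run.

-- ===== PORT A =====
-- literal transliteration of A: loop i over range(longitud), guard i < longitud-1,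
-- compare the two length-2 slices.
def cadena_fosforo (a : String) (b : String) : Int :=
  let la := a.toList
  let lb := b.toList
  let longitud : Int := min (la.length : Int) (lb.length : Int)
  (PySem.List.pyRange 0 longitud 1).foldl
    (fun contador i =>
      if i < longitud - 1 then
        if PySem.List.slice la (some i) (some (i + 2)) =
           PySem.List.slice lb (some i) (some (i + 2)) then contador + 1 else contador
      else contador) 0

-- ===== PORT B =====
-- inner while loop of Source B: advance j while j < n and a[j] == b[j]
def pvRunEnd (la lb : List Char) (n j : Nat) : Nat :=
  if h : j < n ∧ la.getD j ' ' = lb.getD j ' ' then pvRunEnd la lb n (j + 1) else j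
termination_by n - j
decreasing_by omega

-- facts the outer loop needs for termination
lemma pvRunEnd_ge (la lb : List Char) (n j : Nat) : j ≤ pvRunEnd la lb n j := by
  fun_induction pvRunEnd la lb n j with
  | case1 j h ih => omega
  | case2 j h => omega

lemma pvRunEnd_le (la lb : List Char) (n j : Nat) (hj : j ≤ n) : pvRunEnd la lb n j ≤ n := by
  fun_induction pvRunEnd la lb n j with
  | case1 j h ih => exact ih (by omega)
  | case2 j h => omega

lemma pvRunEnd_gt (la lb : List Char) (n i : Nat) (h1 : i < n)
    (h2 : la.getD i ' ' = lb.getD i ' ') : i < pvRunEnd la lb n i := by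
  rw [pvRunEnd, dif_pos ⟨h1, h2⟩]
  have := pvRunEnd_ge la lb n (i + 1)
  omega

-- outer while loop of Source B
def pvOuter (la lb : List Char) (n i : Nat) (total : Int) : Int :=
  if h : i < n then
    if hm : la.getD i ' ' = lb.getD i ' ' then
      pvOuter la lb n (pvRunEnd la lb n i)
        (total + ((pvRunEnd la lb n i : Int) - (i : Int) - 1))
    else pvOuter la lb n (i + 1) total
  else total
termination_by n - i
decreasing_by
  · have h1 := pvRunEnd_gt la lb n i h hm
    have h2 := pvRunEnd_le la lb n i (by omega)
    omega
  · omega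

-- literal transliteration of Source B (run-length decomposition)
def cadena_fosforo_alt (a : String) (b : String) : Int :=
  let la := a.toList
  let lb := b.toList
  pvOuter la lb (min la.length lb.length) 0 0

-- ===== PRECONDITION & SPEC =====
def Spec_cadena_fosforo (a : String) (b : String) (out : Int) : Prop := out = cadena_fosforo_alt a b
instance (a : String) (b : String) (out : Int) : Decidable (Spec_cadena_fosforo a b out) := by unfold Spec_cadena_fosforo; infer_instance

-- ===== CLAIM (what is proved, stated in full; the proofs are below) =====
def Claim_equal_cadena_fosforo : Prop := ∀ (a : String) (b : String), Dom_cadena_fosforo a b → Spec_cadena_fosforo a b (cadena_fosforo a b)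

-- ===== LEMMAS AND PROOFS =====

-- the adjacent-pair predicate both programs count
abbrev pvPair (la lb : List Char) (k : Nat) : Prop :=
  la.getD k ' ' = lb.getD k ' ' ∧ la.getD (k + 1) ' ' = lb.getD (k + 1) ' '

-- canonical count of pairs with index in [i, n-1)
def pvCnt (la lb : List Char) (n i : Nat) : Nat :=
  (List.range' i (n - 1 - i)).countP (fun k => decide (pvPair la lb k))

-- everything in [j, pvRunEnd j) matches
lemma pvRunEnd_run (la lb : List Char) (n j : Nat) :
    ∀ k, j ≤ k → k < pvRunEnd la lb n j → la.getD k ' ' = lb.getD k ' ' := by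
  fun_induction pvRunEnd la lb n j with
  | case1 j h ih =>
    intro k hk1 hk2
    rcases Nat.eq_or_lt_of_le hk1 with rfl | hlt
    · exact h.2
    · exact ih k hlt hk2
  | case2 j h => intro k hk1 hk2; omega

-- the run stops at a mismatch (or at n)
lemma pvRunEnd_stop (la lb : List Char) (n j : Nat) (h : pvRunEnd la lb n j < n) :
    ¬ la.getD (pvRunEnd la lb n j) ' ' = lb.getD (pvRunEnd la lb n j) ' ' := by
  fun_induction pvRunEnd la lb n j with
  | case1 j hc ih => exact ih h
  | case2 j hc =>
    intro heq
    exact hc ⟨h, heq⟩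

-- a run where every position matches has all pairs counted
lemma countP_run (la lb : List Char) (i len : Nat)
    (hall : ∀ k, i ≤ k → k < i + len + 1 → la.getD k ' ' = lb.getD k ' ') :
    (List.range' i len).countP (fun k => decide (pvPair la lb k)) = len := by
  induction len generalizing i with
  | zero => simp
  | succ m ih =>
    rw [List.range'_succ, List.countP_cons]
    have hp : pvPair la lb i := ⟨hall i (by omega) (by omega), hall (i+1) (by omega) (by omega)⟩
    rw [ih (i + 1) (fun k hk1 hk2 => hall k (by omega) (by omega)), decide_eq_true hp]
    simp

-- count split at a run: a maximal run [i, j) contributes j - i - 1 pairs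
lemma pvCnt_split (la lb : List Char) (n i j : Nat) (hij : i < j) (hjn : j ≤ n)
    (hrun : ∀ k, i ≤ k → k < j → la.getD k ' ' = lb.getD k ' ')
    (hstop : j < n → ¬ la.getD j ' ' = lb.getD j ' ') :
    pvCnt la lb n i = (j - i - 1) + pvCnt la lb n j := by
  unfold pvCnt
  rcases Nat.eq_or_lt_of_le hjn with rfl | hjlt
  · have h0 : j - 1 - j = 0 := by omega
    rw [h0]
    simp only [List.range'_zero, List.countP_nil]
    have := countP_run la lb i (j - 1 - i)
      (fun k hk1 hk2 => hrun k hk1 (by omega))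
    omega
  · have hsplit : n - 1 - i = (j - 1 - i) + (n - j) := by omega
    rw [hsplit, ← List.range'_append, List.countP_append]
    have hfirst : (List.range' i (j - 1 - i)).countP (fun k => decide (pvPair la lb k))
        = j - 1 - i :=
      countP_run la lb i (j - 1 - i) (fun k hk1 hk2 => hrun k hk1 (by omega))
    have hidx : i + 1 * (j - 1 - i) = j - 1 := by omega
    have hnj : n - j = (n - 1 - j) + 1 := by omega
    rw [hidx, hnj, List.range'_succ, List.countP_cons]
    have hpf : ¬ pvPair la lb (j - 1) := by
      intro hp
      have hjj : j - 1 + 1 = j := by omega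
      obtain ⟨-, hp2⟩ := hp
      rw [hjj] at hp2
      exact hstop hjlt hp2
    have hj1 : j - 1 + 1 = j := by omega
    rw [hfirst, decide_eq_false hpf]
    simp only [hj1]
    simp
    omega

-- skipping a mismatching position does not change the count
lemma pvCnt_skip (la lb : List Char) (n i : Nat)
    (hm : ¬ la.getD i ' ' = lb.getD i ' ') :
    pvCnt la lb n i = pvCnt la lb n (i + 1) := by
  unfold pvCnt
  by_cases hlt : i < n - 1
  · have h1 : n - 1 - i = (n - 1 - (i + 1)) + 1 := by omega
    rw [h1, List.range'_succ, List.countP_cons]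
    have hpf : ¬ pvPair la lb i := fun hp => hm hp.1
    simp [hpf]
  · have h1 : n - 1 - i = 0 := by omega
    have h2 : n - 1 - (i + 1) = 0 := by omega
    rw [h1, h2]
    simp

-- B's outer loop computes total + pvCnt
lemma pvOuter_eq (la lb : List Char) (n i : Nat) (total : Int) :
    pvOuter la lb n i total = total + (pvCnt la lb n i : Int) := by
  fun_induction pvOuter la lb n i total with
  | case1 i total h hm ih =>
    have hij : i < pvRunEnd la lb n i := pvRunEnd_gt la lb n i h hm
    have hjn : pvRunEnd la lb n i ≤ n := pvRunEnd_le la lb n i (by omega)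
    rw [ih, pvCnt_split la lb n i (pvRunEnd la lb n i) hij hjn
      (pvRunEnd_run la lb n i) (pvRunEnd_stop la lb n i)]
    push_cast
    omega
  | case2 i total h hm ih =>
    rw [ih, ← pvCnt_skip la lb n i hm]
  | case3 i total h =>
    have h0 : n - 1 - i = 0 := by omega
    unfold pvCnt
    rw [h0]
    simp

-- take 2 after drop k is the explicit two-element window
lemma take_two_drop {α : Type} (xs : List α) (k : Nat) (h : k + 1 < xs.length) :
    (xs.drop k).take 2 = [xs[k], xs[k + 1]] := by
  rw [List.drop_eq_getElem_cons (by omega)]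
  rw [List.drop_eq_getElem_cons (l := xs) (i := k + 1) (by omega)]
  rfl

-- A equals the canonical count
lemma A_eq_cnt (a b : String) :
    cadena_fosforo a b
      = (pvCnt a.toList b.toList (min a.toList.length b.toList.length) 0 : Int) := by
  simp only [cadena_fosforo]
  set la := a.toList
  set lb := b.toList
  set L : Nat := min la.length lb.length with hL
  have hLcast : min (la.length : Int) (lb.length : Int) = ((L : Nat) : Int) := by
    simp [hL]
  rw [hLcast]
  refine ((PySem.List.foldl_congr_mem _ _
      (fun (contador : Int) (i : Int) =>
        if (i < (L : Int) - 1 ∧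
            PySem.List.slice la (some i) (some (i + 2)) =
            PySem.List.slice lb (some i) (some (i + 2))) then contador + 1 else contador) 0
      ?_).trans ?_)
  · intro acc x _
    by_cases h1 : x < (L : Int) - 1 <;>
      by_cases h2 : PySem.List.slice la (some x) (some (x + 2)) =
        PySem.List.slice lb (some x) (some (x + 2))  <;>
      simp [h1, h2]
  refine (PySem.List.foldl_ite_add_one _ _ 0).trans ?_
  rw [Int.zero_add]
  by_cases hL0 : L = 0
  · rw [hL0]
    simp [PySem.List.pyRange, pvCnt]
  · have hsplit : PySem.List.pyRange 0 (L : Int) 1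
        = PySem.List.pyRange 0 ((L : Int) - 1) 1 ++ PySem.List.pyRange ((L : Int) - 1) (L : Int) 1 :=
      PySem.List.pyRange_one_append 0 ((L : Int) - 1) (L : Int) (by omega) (by omega)
    rw [hsplit, List.countP_append]
    have htail : (PySem.List.pyRange ((L : Int) - 1) (L : Int) 1).countP
        (fun i => decide (i < (L : Int) - 1 ∧
          PySem.List.slice la (some i) (some (i + 2)) =
          PySem.List.slice lb (some i) (some (i + 2)))) = 0 := by
      apply List.countP_eq_zero.2
      intro i hi
      rw [PySem.List.mem_pyRange_one] at hi
      simp only [decide_eq_true_eq, not_and]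
      intro hlt
      omega
    rw [htail, Nat.add_zero]
    have hcast : ((L : Int) - 1) = (((L - 1 : Nat) : Nat) : Int) := by omega
    rw [hcast, PySem.List.pyRange_zero_natCast, List.countP_map]
    unfold pvCnt
    rw [Nat.sub_zero, List.range_eq_range']
    congr 1
    apply List.countP_congr
    intro k hk
    rw [List.mem_range'] at hk
    have hkL : k < L - 1 := by omega
    have hk1 : k + 1 < L := by omega
    have hka : k + 1 < la.length := by omega
    have hkb : k + 1 < lb.length := by omega
    have hsa : PySem.List.slice la (some (k : Int)) (some ((k : Int) + 2))
        = [la[k], la[k + 1]] := by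
      have h2 : ((k : Int) + 2) = ((k + 2 : Nat) : Int) := by push_cast; ring
      rw [h2, PySem.List.slice_natCast]
      have h3 : k + 2 - k = 2 := by omega
      rw [h3, take_two_drop la k hka]
    have hsb : PySem.List.slice lb (some (k : Int)) (some ((k : Int) + 2))
        = [lb[k], lb[k + 1]] := by
      have h2 : ((k : Int) + 2) = ((k + 2 : Nat) : Int) := by push_cast; ring
      rw [h2, PySem.List.slice_natCast]
      have h3 : k + 2 - k = 2 := by omega
      rw [h3, take_two_drop lb k hkb]
    simp only [Function.comp_apply, hsa, hsb, decide_eq_true_eq]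
    have e1 := List.getD_eq_getElem la ' ' (show k < la.length by omega)
    have e2 := List.getD_eq_getElem lb ' ' (show k < lb.length by omega)
    have e3 := List.getD_eq_getElem la ' ' hka
    have e4 := List.getD_eq_getElem lb ' ' hkb
    unfold pvPair
    rw [e1, e2, e3, e4]
    constructor
    · rintro ⟨-, heq⟩
      simp only [List.cons.injEq, and_true] at heq
      exact ⟨heq.1, heq.2⟩
    · rintro ⟨h1, h2⟩
      exact ⟨by exact_mod_cast hkL, by rw [h1, h2]⟩

lemma core (a b : String) : cadena_fosforo a b = cadena_fosforo_alt a b := by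
  rw [A_eq_cnt]
  simp only [cadena_fosforo_alt]
  rw [pvOuter_eq]
  rw [Int.zero_add]

-- ===== VERDICT (by name: the statement is the Claim_ definition above) =====
theorem cadena_fosforo_spec : Claim_equal_cadena_fosforo := by
  intro a b _
  unfold Spec_cadena_fosforo
  exact core a b
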